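-- pv_equiv track=rewrite | github.com/Crunchies1/advent_of_code_2024 | q1/q1.py | similarities
-- ===== SOURCE A (Python) =====
-- def similarities(locations_1: list[int], locations_2: list[int]) -> int:
--     similarities: dict[int, int] = {}
--     total_similarities: int = 0
--     for location_1 in locations_1:
--         if location_1 in similarities:
--             total_similarities += similarities[location_1]
--             continue
--
--         same_occurences: int = 0
--         for location_2 in locations_2:
--             if location_1 == location_2:
--                 same_occurences += 1
--
--         similarities[location_1] = same_occurences * location_1
--         total_similarities += similarities[location_1]
--
--     return total_similarities
-- ===== SOURCE B (Python) =====
-- def similarities(locations_1: list[int], locations_2: list[int]) -> int: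
--     counts: dict[int, int] = {}
--     for location_2 in locations_2:
--         counts[location_2] = counts.get(location_2, 0) + 1
--     return sum(location_1 * counts.get(location_1, 0) for location_1 in locations_1)
-- ===== Notes on version B (the rewrite author's own statement) =====
-- stated objective: faster
-- what changed: B builds a count table of locations_2 in one pass and sums location*count over locations_1, eliminating A's per-distinct-element inner scan of locations_2 and its memo dict.
import Mathlib
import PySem

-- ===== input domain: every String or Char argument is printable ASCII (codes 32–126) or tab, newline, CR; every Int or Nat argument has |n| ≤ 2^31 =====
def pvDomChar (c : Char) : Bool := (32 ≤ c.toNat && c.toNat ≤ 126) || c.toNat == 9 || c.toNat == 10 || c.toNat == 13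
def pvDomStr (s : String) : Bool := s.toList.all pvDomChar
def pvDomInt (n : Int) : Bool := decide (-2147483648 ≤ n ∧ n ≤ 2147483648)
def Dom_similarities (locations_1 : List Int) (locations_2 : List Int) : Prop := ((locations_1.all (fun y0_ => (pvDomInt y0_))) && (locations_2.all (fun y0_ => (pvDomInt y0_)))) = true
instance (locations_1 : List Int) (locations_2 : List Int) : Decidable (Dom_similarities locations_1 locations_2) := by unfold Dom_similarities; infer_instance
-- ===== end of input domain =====

-- B replaces A's per-element inner scan of locations_2 (memoised per distinct value) by a
-- single counting pass over locations_2 followed by one summing pass over locations_1 (faster).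


-- ===== PORT A =====
-- inner loop: 'for location_2 in locations_2: if location_1 == location_2: same_occurences += 1'
def simAInner (location_1 : Int) (locations_2 : List Int) : Int :=
  locations_2.foldl (fun same_occurences location_2 =>
    if location_1 == location_2 then same_occurences + 1 else same_occurences) 0

-- state = (similarities dict, total_similarities); one step per location_1
def simAStep (locations_2 : List Int) (st : PySem.Dict Int Int × Int) (location_1 : Int) :
    PySem.Dict Int Int × Int :=
  match st.1.get? location_1 with
  | some v => (st.1, st.2 + v)
  | none =>
      let val := simAInner location_1 locations_2 * location_1
      (st.1.insert location_1 val, st.2 + val)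

def similarities (locations_1 : List Int) (locations_2 : List Int) : Int :=
  (locations_1.foldl (simAStep locations_2) (PySem.Dict.empty, 0)).2

-- ===== PORT B =====
def similarities_alt (locations_1 : List Int) (locations_2 : List Int) : Int :=
  let counts : PySem.Dict Int Int :=
    locations_2.foldl (fun counts location_2 =>
      counts.insert location_2 (counts.getD location_2 0 + 1)) PySem.Dict.empty
  locations_1.foldl (fun total location_1 => total + location_1 * counts.getD location_1 0) 0

-- ===== PRECONDITION & SPEC =====
def Spec_similarities (locations_1 : List Int) (locations_2 : List Int) (out : Int) : Prop := out = similarities_alt locations_1 locations_2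
instance (locations_1 : List Int) (locations_2 : List Int) (out : Int) : Decidable (Spec_similarities locations_1 locations_2 out) := by unfold Spec_similarities; infer_instance

-- ===== CLAIM (what is proved, stated in full; the proofs are below) =====
def Claim_equal_similarities : Prop := ∀ (locations_1 : List Int) (locations_2 : List Int), Dom_similarities locations_1 locations_2 → Spec_similarities locations_1 locations_2 (similarities locations_1 locations_2)

-- ===== LEMMAS AND PROOFS =====

-- A's inner scan counts occurrences
theorem simAInner_eq_count (a : Int) (l2 : List Int) :
    simAInner a l2 = (l2.count a : Int) := by
  unfold simAInner
  suffices h : ∀ (acc : Int), l2.foldl (fun s x => if a == x then s + 1 else s) acc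
      = acc + (l2.count a : Int) by
    simpa using h 0
  induction l2 with
  | nil => intro acc; simp
  | cons x xs ih =>
      intro acc
      rw [List.foldl_cons]
      by_cases hx : a = x
      · rw [if_pos (beq_iff_eq.mpr hx), ih]
        have hc : (x :: xs).count a = xs.count a + 1 := by
          simp [List.count_cons, hx]
        rw [hc]; push_cast; ring
      · rw [if_neg (by simp [hx]), ih]
        have hxa : ¬ x = a := fun h => hx h.symm
        have hc : (x :: xs).count a = xs.count a := by
          simp [List.count_cons, hxa]
        rw [hc]

-- invariant: every cached value in the memo dict is count * key; the running total
-- then advances by (count k) * k at every step, on both branches.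
theorem simA_foldl_eq (l2 : List Int) :
    ∀ (l1 : List Int) (d : PySem.Dict Int Int) (tot : Int),
      (∀ k v, d.get? k = some v → v = (l2.count k : Int) * k) →
      (l1.foldl (simAStep l2) (d, tot)).2
        = tot + (l1.map (fun k => (l2.count k : Int) * k)).sum := by
  intro l1
  induction l1 with
  | nil => intro d tot _; simp
  | cons a xs ih =>
      intro d tot hinv
      simp only [List.foldl_cons, List.map_cons, List.sum_cons]
      cases hget : d.get? a with
      | some v =>
          have hstep : simAStep l2 (d, tot) a = (d, tot + v) := by
            simp [simAStep, hget]
          rw [hstep, ih d (tot + v) hinv, hinv a v hget]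
          ring
      | none =>
          have hstep : simAStep l2 (d, tot) a
              = (d.insert a ((l2.count a : Int) * a), tot + (l2.count a : Int) * a) := by
            simp [simAStep, hget, simAInner_eq_count]
          have hinv' : ∀ k v,
              (d.insert a ((l2.count a : Int) * a)).get? k = some v →
              v = (l2.count k : Int) * k := by
            intro k v hkv
            rw [PySem.Dict.get?_insert] at hkv
            by_cases hk : k = a
            · simp [hk] at hkv; subst hk; omega
            · simp [hk] at hkv; exact hinv k v hkv
          rw [hstep, ih _ _ hinv']
          ring

theorem similarities_eq_sum (l1 l2 : List Int) :
    similarities l1 l2 = (l1.map (fun k => (l2.count k : Int) * k)).sum := by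
  unfold similarities
  rw [simA_foldl_eq l2 l1 PySem.Dict.empty 0 (by intro k v h; simp [PySem.Dict.get?_empty] at h)]
  simp

theorem similarities_alt_eq_sum (l1 l2 : List Int) :
    similarities_alt l1 l2 = (l1.map (fun k => (l2.count k : Int) * k)).sum := by
  unfold similarities_alt
  rw [PySem.Dict.foldl_insert_getD_add_one_eq_counter]
  suffices h : ∀ (tot : Int),
      l1.foldl (fun total k => total + k * (PySem.Dict.counter l2).getD k 0) tot
        = tot + (l1.map (fun k => (l2.count k : Int) * k)).sum by
    simpa using h 0
  induction l1 with
  | nil => intro tot; simp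
  | cons a xs ih =>
      intro tot
      rw [List.foldl_cons, ih]
      simp only [List.map_cons, List.sum_cons, PySem.Dict.getD_counter]
      ring

-- ===== VERDICT (by name: the statement is the Claim_ definition above) =====
theorem similarities_spec : Claim_equal_similarities := by
  intro l1 l2 _
  unfold Spec_similarities
  rw [similarities_eq_sum, similarities_alt_eq_sum]
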